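-- pv_equiv track=rewrite | github.com/YashBaraii/Python-Practice | Module 3/Section 12/99_track_digit_freq_in_num.py | track_freq
-- ===== SOURCE A (Python) =====
-- def track_freq(num):
--     dict = {}
--     st_num = str(num)
--     for ch in st_num:
--         if int(ch) in dict:
--             dict[int(ch)] += 1
--         else:
--             dict[int(ch)] = 1
--
--     return dict
-- ===== SOURCE B (Python) =====
-- def track_freq(num):
--     # Arithmetic digit extraction: recurse on num // 10 (the leading prefix) first,
--     # then record the last digit num % 10, so counts are inserted left-to-right.
--     def go(n, acc):
--         if n < 10:
--             acc[n] = acc.get(n, 0) + 1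
--         else:
--             go(n // 10, acc)
--             d = n % 10
--             acc[d] = acc.get(d, 0) + 1
--         return acc
--     return go(num, {})
-- ===== Notes on version B (the rewrite author's own statement) =====
-- stated objective: alternative
-- what changed: B never converts the number to a string: it extracts digits arithmetically by recursive divmod (recursing on num // 10 first so digits are counted left-to-right), replacing A's iterate-over-str(num) pass with int(ch) parsing and a conditional dict insert/increment.
import Mathlib
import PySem

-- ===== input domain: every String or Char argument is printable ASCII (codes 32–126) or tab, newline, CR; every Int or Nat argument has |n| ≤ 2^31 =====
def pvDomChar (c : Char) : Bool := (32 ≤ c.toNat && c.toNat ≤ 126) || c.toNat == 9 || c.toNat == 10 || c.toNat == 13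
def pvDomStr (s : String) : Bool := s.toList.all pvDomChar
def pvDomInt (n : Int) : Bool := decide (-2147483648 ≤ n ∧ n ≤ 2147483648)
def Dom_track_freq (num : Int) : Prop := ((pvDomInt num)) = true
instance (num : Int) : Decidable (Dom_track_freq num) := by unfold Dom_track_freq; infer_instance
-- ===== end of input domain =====

-- B drops the string conversion entirely: digits are extracted arithmetically by recursive divmod (prefix first, so counts land left-to-right) instead of A's iterate-over-str(num) pass with a conditional dict insert/increment; same cost, different algorithm.
-- Pre_ excludes negative num, on which Python A raises ValueError at int('-').


-- ===== PORT A =====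
-- int(ch) for a single char; total form via getD 0 — exact on Pre_ (digits only, where ofStr? is always some)
def pvDigit (ch : Char) : Int := (PySem.Int.ofStr? (String.ofList [ch])).getD 0

def track_freq (num : Int) : List (Int × Int) :=
  let st_num := (PySem.Int.toStr num).toList
  (st_num.foldl (fun d ch =>
      if d.contains (pvDigit ch) then d.insert (pvDigit ch) (d.getD (pvDigit ch) 0 + 1)
      else d.insert (pvDigit ch) 1)
    PySem.Dict.empty).items

-- ===== PORT B =====
-- Source B's inner 'go': recurse on n // 10 first, then record n % 10
def track_go (n : Int) (acc : PySem.Dict Int Int) : PySem.Dict Int Int :=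
  if h : n < 10 then acc.insert n (acc.getD n 0 + 1)
  else
    let acc' := track_go (PySem.Int.floordiv n 10) acc
    let d := PySem.Int.mod n 10
    acc'.insert d (acc'.getD d 0 + 1)
termination_by n.toNat
decreasing_by
  simp only [PySem.Int.floordiv]
  rw [Int.fdiv_eq_ediv]
  omega

def track_freq_alt (num : Int) : List (Int × Int) :=
  (track_go num PySem.Dict.empty).items

-- ===== PRECONDITION & SPEC =====
-- Pre_ excludes negative num, on which Python A raises ValueError at int('-'); nothing A returns on is excluded.
def Pre_track_freq (num : Int) : Prop := 0 ≤ num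
instance (num : Int) : Decidable (Pre_track_freq num) := by unfold Pre_track_freq; infer_instance
def pvWitness_track_freq : Int := (1223001)

def Spec_track_freq (num : Int) (out : List (Int × Int)) : Prop := out = track_freq_alt num
instance (num : Int) (out : List (Int × Int)) : Decidable (Spec_track_freq num out) := by unfold Spec_track_freq; infer_instance

-- ===== CLAIM (what is proved, stated in full; the proofs are below) =====
def Claim_equal_track_freq : Prop := ∀ (num : Int), Dom_track_freq num → Pre_track_freq num → Spec_track_freq num (track_freq num)

-- ===== LEMMAS AND PROOFS =====
-- left-to-right decimal digit characters of a natural number, as a structural recursion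
def pvNatChars (n : Nat) : List Char :=
  if n < 10 then [Nat.digitChar n] else pvNatChars (n / 10) ++ [Nat.digitChar (n % 10)]
decreasing_by omega

-- the same digits as integers
def pvNatDigits (n : Nat) : List Int :=
  if n < 10 then [(n : Int)] else pvNatDigits (n / 10) ++ [((n % 10 : Nat) : Int)]
decreasing_by omega

-- core's fuelled toDigitsCore produces exactly pvNatChars (fuel sufficient)
theorem pv_toDigitsCore_eq (f : Nat) : ∀ (n : Nat) (ds : List Char), n < f →
    Nat.toDigitsCore 10 f n ds = pvNatChars n ++ ds := by
  induction f with
  | zero => intro n ds h; omega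
  | succ f ih =>
    intro n ds h
    rw [Nat.toDigitsCore]
    by_cases h10 : n < 10
    · have : n / 10 = 0 := Nat.div_eq_of_lt h10
      simp [this, pvNatChars, h10, Nat.mod_eq_of_lt h10]
    · have hne : ¬ n / 10 = 0 := by omega
      have hlt : n / 10 < f := by omega
      rw [if_neg hne, ih _ _ hlt]
      conv_rhs => rw [pvNatChars]
      rw [if_neg h10, List.append_assoc]
      rfl

theorem pv_toChars_eq (num : Int) (h : 0 ≤ num) :
    (PySem.Int.toStr num).toList = pvNatChars num.toNat := by
  rw [PySem.Int.toList_toStr]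
  simp only [PySem.Int.toChars, if_neg (by omega : ¬ num < 0)]
  rw [Nat.toDigits, pv_toDigitsCore_eq (num.toNat + 1) num.toNat [] (by omega), List.append_nil]

-- pvDigit reads back a digit character
theorem pv_digitChar (d : Nat) (h : d < 10) : pvDigit (Nat.digitChar d) = (d : Int) := by
  interval_cases d <;> decide

theorem pv_map_natChars (n : Nat) : (pvNatChars n).map pvDigit = pvNatDigits n := by
  induction n using pvNatChars.induct with
  | case1 n h => rw [pvNatChars, if_pos h, pvNatDigits, if_pos h]; simp [pv_digitChar n h]
  | case2 n h ih =>
    rw [pvNatChars, if_neg h, pvNatDigits, if_neg h, List.map_append, ih]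
    simp [pv_digitChar (n % 10) (by omega)]

-- A's conditional update is the unconditional counter step
theorem pv_step_eq :
    (fun (d : PySem.Dict Int Int) (ch : Char) =>
      if d.contains (pvDigit ch) then d.insert (pvDigit ch) (d.getD (pvDigit ch) 0 + 1)
      else d.insert (pvDigit ch) 1)
    = (fun (d : PySem.Dict Int Int) (ch : Char) =>
        d.insert (pvDigit ch) (d.getD (pvDigit ch) 0 + 1)) := by
  funext d ch
  by_cases h : d.contains (pvDigit ch)
  · simp [h]
  · have h0 : d.get? (pvDigit ch) = none := by
      rw [PySem.Dict.get?_eq_none_iff_contains]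
      simpa using h
    simp [h, PySem.Dict.getD, h0]

-- B's recursion is the counter fold over the digit list
theorem pv_go_eq_fuel (k : Nat) : ∀ (n : Int), n.toNat ≤ k → 0 ≤ n →
    ∀ (acc : PySem.Dict Int Int),
    track_go n acc
    = (pvNatDigits n.toNat).foldl (fun d x => d.insert x (d.getD x 0 + 1)) acc := by
  induction k with
  | zero =>
    intro n hk h acc
    have h10 : n < 10 := by omega
    rw [track_go, dif_pos h10, pvNatDigits, if_pos (by omega), List.foldl_cons, List.foldl_nil,
        Int.toNat_of_nonneg h]
  | succ k ih =>
    intro n hk h acc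
    by_cases h10 : n < 10
    · rw [track_go, dif_pos h10, pvNatDigits, if_pos (by omega), List.foldl_cons, List.foldl_nil,
          Int.toNat_of_nonneg h]
    · have hfd : PySem.Int.floordiv n 10 = ((n.toNat / 10 : Nat) : Int) := by
        simp only [PySem.Int.floordiv]
        rw [Int.fdiv_eq_ediv]
        omega
      have hmd : PySem.Int.mod n 10 = ((n.toNat % 10 : Nat) : Int) := by
        simp only [PySem.Int.mod]
        rw [Int.fmod_eq_emod]
        omega
      rw [track_go, dif_neg h10]
      conv_rhs => rw [pvNatDigits, if_neg (by omega : ¬ n.toNat < 10)]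
      rw [List.foldl_append, List.foldl_cons, List.foldl_nil]
      rw [ih (PySem.Int.floordiv n 10) (by rw [hfd]; omega) (by rw [hfd]; positivity), hfd, hmd,
          Int.toNat_natCast]

theorem pv_go_eq (n : Int) (h : 0 ≤ n) (acc : PySem.Dict Int Int) :
    track_go n acc
    = (pvNatDigits n.toNat).foldl (fun d x => d.insert x (d.getD x 0 + 1)) acc :=
  pv_go_eq_fuel n.toNat n le_rfl h acc

-- folding the counter step over chars keyed by pvDigit is the counter fold over the mapped digit list
theorem pv_fold_chars (l : List Char) (d0 : PySem.Dict Int Int) :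
    l.foldl (fun d ch => d.insert (pvDigit ch) (d.getD (pvDigit ch) 0 + 1)) d0
    = (l.map pvDigit).foldl (fun d x => d.insert x (d.getD x 0 + 1)) d0 := by
  rw [List.foldl_map]

-- ===== VERDICT (by name: the statement is the Claim_ definition above) =====
theorem track_freq_spec : Claim_equal_track_freq := by
  intro num _ hpre
  show track_freq num = track_freq_alt num
  simp only [track_freq, track_freq_alt, pv_step_eq]
  rw [pv_toChars_eq num hpre, pv_fold_chars, pv_map_natChars, pv_go_eq num hpre]
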